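-- pv_equiv track=rewrite | github.com/wfjin/LING570 | HW7/viterbi2.py | symb_state_list
-- ===== SOURCE A (Python) =====
-- def symb_state_list(hmm_file, line_breakers):
--     i = 0
--     j = 0
--     q = 0
--     init_start = line_breakers[0]
--     transition_start = line_breakers[1]
--     emission_start = line_breakers[2]
--     statelist = dict()
--     wordlist = dict()
--     for line in hmm_file:
--         i += 1
--         if i < init_start:
--             continue
--         elif i > init_start and i < transition_start:
--             sentence = line.split()
--             if len(sentence) == 0:
--                 continue
--             st_state = sentence[0]
--             if st_state not in statelist:
--                 statelist[st_state] = j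
--                 j += 1
--         elif i > transition_start and i < emission_start:
--             sentence = line.split()
--             if len(sentence) == 0:
--                 continue
--             from_state = sentence[0]
--             to_state = sentence[1]
--             if from_state not in statelist:
--                 statelist[from_state] = j
--                 j += 1
--             if to_state not in statelist:
--                 statelist[to_state] = j
--                 j += 1
--         elif i > emission_start:
--             sentence = line.split()
--             if len(sentence) == 0:
--                 continue
--             from_state = sentence[0]
--             from_id = statelist[from_state]
--             symb = sentence[1]
--             if symb not in wordlist:
--                 wordlist[symb] = q
--                 q += 1
--     return (statelist, wordlist)
-- ===== SOURCE B (Python) =====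
-- def _index_map(tokens):
--     d = {}
--     for t in tokens:
--         if t not in d:
--             d[t] = len(d)
--     return d
--
--
-- def symb_state_list(hmm_file, line_breakers):
--     init_start = line_breakers[0]
--     transition_start = line_breakers[1]
--     emission_start = line_breakers[2]
--
--     def section(i):
--         if i < init_start:
--             return 0
--         if init_start < i < transition_start:
--             return 1
--         if transition_start < i < emission_start:
--             return 2
--         if i > emission_start:
--             return 3
--         return 0
--
--     state_toks = []
--     word_toks = []
--     for idx, line in enumerate(hmm_file):
--         sec = section(idx + 1)
--         if sec == 0:
--             continue
--         toks = line.split()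
--         if not toks:
--             continue
--         if sec == 1:
--             state_toks.append(toks[0])
--         elif sec == 2:
--             state_toks.extend(toks[:2])
--         else:
--             word_toks.append(toks[1])
--     return (_index_map(state_toks), _index_map(word_toks))
-- ===== Notes on version B (the rewrite author's own statement) =====
-- stated objective: alternative
-- what changed: A's single stateful loop with interleaved id counters is re-decomposed into two passes: classify each line by section and collect the state-token and word-token streams, then assign first-occurrence ids with one generic index-map builder; B never performs A's discarded emission-side statelist lookup.
import Mathlib
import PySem

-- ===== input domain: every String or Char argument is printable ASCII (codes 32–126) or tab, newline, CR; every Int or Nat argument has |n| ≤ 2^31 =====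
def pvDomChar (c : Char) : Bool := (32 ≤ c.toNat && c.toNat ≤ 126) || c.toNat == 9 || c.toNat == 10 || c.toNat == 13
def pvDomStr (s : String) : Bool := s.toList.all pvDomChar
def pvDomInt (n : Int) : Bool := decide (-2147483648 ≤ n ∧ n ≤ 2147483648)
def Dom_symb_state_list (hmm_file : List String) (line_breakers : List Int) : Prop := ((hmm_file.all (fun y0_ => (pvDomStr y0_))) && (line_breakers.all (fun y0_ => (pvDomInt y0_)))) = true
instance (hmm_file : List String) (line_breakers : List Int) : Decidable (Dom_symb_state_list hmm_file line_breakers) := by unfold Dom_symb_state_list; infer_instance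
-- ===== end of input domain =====

-- B re-decomposes A's single stateful loop into two passes (collect the token streams per
-- section, then assign first-occurrence ids with a generic index-map builder); same cost,
-- objective: alternative decomposition. Equivalence is claimed on Pre_ (the inputs where A
-- returns without raising).

-- ===== PORT A =====
-- literal transliteration of A's loop; the state is (i, j, q, statelist, wordlist).
-- Branches where Python raises (sentence[1] on a short line, statelist[from_state] on an
-- unseen state) leave the state unchanged here — those inputs are excluded by Pre_.
def pvStepA (a b c : Int)
    (st : Int × Int × Int × PySem.Dict String Int × PySem.Dict String Int) (line : String) :
    Int × Int × Int × PySem.Dict String Int × PySem.Dict String Int :=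
  let i := st.1 + 1
  let j := st.2.1
  let q := st.2.2.1
  let sd := st.2.2.2.1
  let wd := st.2.2.2.2
  if i < a then (i, j, q, sd, wd)
  else if a < i ∧ i < b then
    match PySem.Str.split₀ line with
    | [] => (i, j, q, sd, wd)
    | t0 :: _ =>
      if sd.contains t0 then (i, j, q, sd, wd)
      else (i, j + 1, q, sd.insert t0 j, wd)
  else if b < i ∧ i < c then
    match PySem.Str.split₀ line with
    | [] => (i, j, q, sd, wd)
    | [_] => (i, j, q, sd, wd)          -- Python: IndexError on sentence[1]; outside Pre_
    | t0 :: t1 :: _ =>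
      let jsd := if sd.contains t0 then (j, sd) else (j + 1, sd.insert t0 j)
      let jsd' := if jsd.2.contains t1 then jsd else (jsd.1 + 1, jsd.2.insert t1 jsd.1)
      (i, jsd'.1, q, jsd'.2, wd)
  else if c < i then
    match PySem.Str.split₀ line with
    | [] => (i, j, q, sd, wd)
    | [_] => (i, j, q, sd, wd)          -- Python: IndexError on sentence[1]; outside Pre_
    | t0 :: t1 :: _ =>
      match sd.get? t0 with
      | none => (i, j, q, sd, wd)       -- Python: KeyError; outside Pre_
      | some _ =>
        if wd.contains t1 then (i, j, q, sd, wd)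
        else (i, j, q + 1, sd, wd.insert t1 q)
  else (i, j, q, sd, wd)

def symb_state_list (hmm_file : List String) (line_breakers : List Int) : (List (String × Int)) × (List (String × Int)) :=
  match PySem.List.pyGet? line_breakers 0, PySem.List.pyGet? line_breakers 1, PySem.List.pyGet? line_breakers 2 with
  | some a, some b, some c =>
    let r := hmm_file.foldl (pvStepA a b c) (0, 0, 0, PySem.Dict.empty, PySem.Dict.empty)
    (r.2.2.2.1.items, r.2.2.2.2.items)
  | _, _, _ => ([], [])                 -- Python: IndexError on line_breakers; outside Pre_

-- ===== PORT B =====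
-- B's section classifier (the chain of strict comparisons with the pre-incremented counter)
def pvSection (a b c i : Int) : Nat :=
  if i < a then 0
  else if a < i ∧ i < b then 1
  else if b < i ∧ i < c then 2
  else if c < i then 3
  else 0

-- B's _index_map: assign first-occurrence ids
def pvIMStep (d : PySem.Dict String Int) (t : String) : PySem.Dict String Int :=
  if d.contains t then d else d.insert t (d.size : Int)

def pvIndexMap (tokens : List String) : PySem.Dict String Int :=
  tokens.foldl pvIMStep PySem.Dict.empty

-- B's loop body: accumulate the state-token and word-token streams
def pvStepB (a b c : Int) (acc : List String × List String) (p : Int × String) :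
    List String × List String :=
  let sec := pvSection a b c (p.1 + 1)
  if sec = 0 then acc
  else
    match PySem.Str.split₀ p.2 with
    | [] => acc
    | t0 :: rest =>
      if sec = 1 then (acc.1 ++ [t0], acc.2)
      else if sec = 2 then (acc.1 ++ (t0 :: rest).take 2, acc.2)
      else
        match rest with
        | t1 :: _ => (acc.1, acc.2 ++ [t1])
        | [] => acc                     -- Python: IndexError on toks[1]; outside Pre_

def symb_state_list_alt (hmm_file : List String) (line_breakers : List Int) : (List (String × Int)) × (List (String × Int)) :=
  -- B reads the three breakpoints one after the other (IndexError, i.e. none, is outside Pre_)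
  match PySem.List.pyGet? line_breakers 0 with
  | none => ([], [])
  | some a =>
    match PySem.List.pyGet? line_breakers 1 with
    | none => ([], [])
    | some b =>
      match PySem.List.pyGet? line_breakers 2 with
      | none => ([], [])
      | some c =>
        let tw := (PySem.List.enumerate hmm_file 0).foldl (pvStepB a b c) ([], [])
        ((pvIndexMap tw.1).items, (pvIndexMap tw.2).items)

-- ===== PRECONDITION & SPEC =====
-- the state tokens contributed by the lines of `lines` when the first line has 0-based global index `start`
def pvAvail (a b c : Int) (start : Int) (lines : List String) : List String :=
  match lines with
  | [] => []
  | l :: ls =>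
    (match pvSection a b c (start + 1), PySem.Str.split₀ l with
     | 1, t0 :: _ => [t0]
     | 2, [t0] => [t0]
     | 2, t0 :: t1 :: _ => [t0, t1]
     | _, _ => []) ++ pvAvail a b c (start + 1) ls

-- per-line condition under which A's Python does not raise at this line:
-- transition lines with a single token raise IndexError, emission lines raise IndexError on a
-- single token and KeyError when the source state was never registered (`avail`).
def pvLineOK (a b c : Int) (i : Int) (toks : List String) (avail : List String) : Prop :=
  (pvSection a b c (i + 1) = 2 → toks ≠ [] → 2 ≤ toks.length) ∧
  (pvSection a b c (i + 1) = 3 → toks ≠ [] → 2 ≤ toks.length ∧ toks.headD "" ∈ avail)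

-- Pre_ holds exactly when A's Python returns: line_breakers has the three breakpoints and no
-- line makes A raise (see pvLineOK).
def Pre_symb_state_list (hmm_file : List String) (line_breakers : List Int) : Prop :=
  3 ≤ line_breakers.length ∧
  ∀ k : Nat, (hk : k < hmm_file.length) →
    pvLineOK (PySem.List.pyGetD line_breakers 0 0) (PySem.List.pyGetD line_breakers 1 0)
      (PySem.List.pyGetD line_breakers 2 0) (k : Int) (PySem.Str.split₀ hmm_file[k])
      (pvAvail (PySem.List.pyGetD line_breakers 0 0) (PySem.List.pyGetD line_breakers 1 0)
        (PySem.List.pyGetD line_breakers 2 0) 0 (hmm_file.take k))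

instance (hmm_file : List String) (line_breakers : List Int) : Decidable (Pre_symb_state_list hmm_file line_breakers) := by
  unfold Pre_symb_state_list pvLineOK; infer_instance

def pvWitness_symb_state_list : List String × List Int :=
  (["init", "A 0.5", "", "trans", "A A 1.0", "emis", "A x 0.5"], [1, 4, 6])

def Spec_symb_state_list (hmm_file : List String) (line_breakers : List Int) (out : (List (String × Int)) × (List (String × Int))) : Prop := out = symb_state_list_alt hmm_file line_breakers
instance (hmm_file : List String) (line_breakers : List Int) (out : (List (String × Int)) × (List (String × Int))) : Decidable (Spec_symb_state_list hmm_file line_breakers out) := by unfold Spec_symb_state_list; infer_instance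

-- ===== CLAIM (what is proved, stated in full; the proofs are below) =====
def Claim_equal_symb_state_list : Prop := ∀ (hmm_file : List String) (line_breakers : List Int), Dom_symb_state_list hmm_file line_breakers → Pre_symb_state_list hmm_file line_breakers → Spec_symb_state_list hmm_file line_breakers (symb_state_list hmm_file line_breakers)

-- ===== LEMMAS AND PROOFS =====

-- the word tokens contributed by `lines` when the first line has 0-based global index `start`
def pvWToks (a b c : Int) (start : Int) (lines : List String) : List String :=
  match lines with
  | [] => []
  | l :: ls =>
    (match pvSection a b c (start + 1), PySem.Str.split₀ l with
     | 3, _ :: t1 :: _ => [t1]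
     | _, _ => []) ++ pvWToks a b c (start + 1) ls

lemma pvSection_cases (a b c i : Int) :
    pvSection a b c i = 0 ∨ pvSection a b c i = 1 ∨ pvSection a b c i = 2 ∨ pvSection a b c i = 3 := by
  unfold pvSection; split_ifs <;> simp

lemma pvIndexMap_snoc (ts : List String) (t : String) :
    pvIndexMap (ts ++ [t]) = pvIMStep (pvIndexMap ts) t := by
  simp [pvIndexMap, List.foldl_append]

lemma contains_foldl_pvIMStep (ts : List String) (d : PySem.Dict String Int) (t : String) :
    (ts.foldl pvIMStep d).contains t = (d.contains t || decide (t ∈ ts)) := by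
  induction ts generalizing d with
  | nil => simp
  | cons t' ts ih =>
    simp only [List.foldl_cons, ih, List.mem_cons]
    unfold pvIMStep
    split_ifs with h
    · by_cases ht : t = t' <;> simp [ht, h] <;> simp [ht] at h <;> simp [h]
    · by_cases ht : t = t'
      · subst ht; simp [PySem.Dict.contains_insert]
      · have hb : (t == t') = false := by simp [ht]
        simp [PySem.Dict.contains_insert, hb, ht]

lemma contains_pvIndexMap (ts : List String) (t : String) :
    (pvIndexMap ts).contains t = decide (t ∈ ts) := by
  simpa using contains_foldl_pvIMStep ts PySem.Dict.empty t

lemma pvAvail_cons (a b c start : Int) (l : String) (ls : List String) :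
    pvAvail a b c start (l :: ls) =
      (match pvSection a b c (start + 1), PySem.Str.split₀ l with
       | 1, t0 :: _ => [t0]
       | 2, [t0] => [t0]
       | 2, t0 :: t1 :: _ => [t0, t1]
       | _, _ => []) ++ pvAvail a b c (start + 1) ls := rfl

lemma pvWToks_cons (a b c start : Int) (l : String) (ls : List String) :
    pvWToks a b c start (l :: ls) =
      (match pvSection a b c (start + 1), PySem.Str.split₀ l with
       | 3, _ :: t1 :: _ => [t1]
       | _, _ => []) ++ pvWToks a b c (start + 1) ls := rfl

-- pvStepA rephrased through B's section classifier (the two if-chains are identical)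
lemma pvStepA_sec (a b c i j q : Int) (sd wd : PySem.Dict String Int) (l : String) :
    pvStepA a b c (i, j, q, sd, wd) l =
      match pvSection a b c (i + 1), PySem.Str.split₀ l with
      | 1, [] => (i + 1, j, q, sd, wd)
      | 1, t0 :: _ =>
        if sd.contains t0 then (i + 1, j, q, sd, wd)
        else (i + 1, j + 1, q, sd.insert t0 j, wd)
      | 2, [] => (i + 1, j, q, sd, wd)
      | 2, [_] => (i + 1, j, q, sd, wd)
      | 2, t0 :: t1 :: _ =>
        let jsd := if sd.contains t0 then (j, sd) else (j + 1, sd.insert t0 j)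
        let jsd' := if jsd.2.contains t1 then jsd else (jsd.1 + 1, jsd.2.insert t1 jsd.1)
        (i + 1, jsd'.1, q, jsd'.2, wd)
      | 3, [] => (i + 1, j, q, sd, wd)
      | 3, [_] => (i + 1, j, q, sd, wd)
      | 3, t0 :: t1 :: _ =>
        match sd.get? t0 with
        | none => (i + 1, j, q, sd, wd)
        | some _ =>
          if wd.contains t1 then (i + 1, j, q, sd, wd)
          else (i + 1, j, q + 1, sd, wd.insert t1 q)
      | _, _ => (i + 1, j, q, sd, wd) := by
  simp only [pvStepA, pvSection]
  split_ifs <;>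
    (cases PySem.Str.split₀ l with
     | nil => rfl
     | cons t0 rest => cases rest <;> rfl)

-- the (counter, dict) pair A maintains is exactly one pvIMStep
lemma pvIMStep_pair (d : PySem.Dict String Int) (t : String) :
    (if d.contains t then ((d.size : Int), d)
     else ((d.size : Int) + 1, d.insert t (d.size : Int)))
    = (((pvIMStep d t).size : Int), pvIMStep d t) := by
  unfold pvIMStep
  split_ifs with h <;> simp [PySem.Dict.size_insert, h]

-- one step of A's loop, characterised through B's token streams
lemma pvStepA_char (a b c : Int) (i : Int) (pts pws : List String) (l : String)
    (hok : pvLineOK a b c i (PySem.Str.split₀ l) pts) :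
    pvStepA a b c (i, ((pvIndexMap pts).size : Int), ((pvIndexMap pws).size : Int),
        pvIndexMap pts, pvIndexMap pws) l =
      (i + 1, ((pvIndexMap (pts ++ pvAvail a b c i [l])).size : Int),
        ((pvIndexMap (pws ++ pvWToks a b c i [l])).size : Int),
        pvIndexMap (pts ++ pvAvail a b c i [l]), pvIndexMap (pws ++ pvWToks a b c i [l])) := by
  obtain ⟨hok2, hok3⟩ := hok
  rw [pvStepA_sec]
  rcases pvSection_cases a b c (i + 1) with hs | hs | hs | hs <;> rw [hs] <;>
    simp only [pvAvail_cons, pvWToks_cons, hs] <;>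
    cases htoks : PySem.Str.split₀ l with
    | nil => simp [pvAvail, pvWToks]
    | cons t0 rest => ?_
  -- section 0
  · simp [pvAvail, pvWToks]
  -- section 1
  · by_cases h : (pvIndexMap pts).contains t0 <;>
      simp [pvAvail, pvWToks, pvIndexMap_snoc, pvIMStep, h, PySem.Dict.size_insert]
  -- section 2
  · cases rest with
    | nil =>
      exact absurd (hok2 hs (by simp [htoks])) (by simp [htoks])
    | cons t1 rest' =>
      simp only []
      rw [pvIMStep_pair, pvIMStep_pair]
      have hA : pvAvail a b c (i + 1) [] = [] := rfl
      have hW : pvWToks a b c (i + 1) [] = [] := rfl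
      simp only [hA, hW, List.append_nil]
      rw [show pts ++ [t0, t1] = (pts ++ [t0]) ++ [t1] by simp, pvIndexMap_snoc, pvIndexMap_snoc]
  -- section 3
  · cases rest with
    | nil =>
      exact absurd (hok3 hs (by simp [htoks])).1 (by simp [htoks])
    | cons t1 rest' =>
      have hmem := (hok3 hs (by simp [htoks])).2
      rw [htoks] at hmem
      simp only [List.headD_cons] at hmem
      have hc : (pvIndexMap pts).contains t0 = true := by
        rw [contains_pvIndexMap]; simpa using hmem
      rw [PySem.Dict.contains_eq_isSome_get?] at hc
      obtain ⟨v, hv⟩ := Option.isSome_iff_exists.mp hc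
      simp only []
      rw [hv]
      by_cases h : (pvIndexMap pws).contains t1 <;>
        simp [pvAvail, pvWToks, pvIndexMap_snoc, pvIMStep, h, PySem.Dict.size_insert]

-- A's fold equals B's two-pass construction on every suffix whose lines satisfy pvLineOK
lemma pvFoldA (a b c : Int) (lines : List String) : ∀ (start : Int) (pts pws : List String),
    (∀ k : Nat, (hk : k < lines.length) →
      pvLineOK a b c (start + k) (PySem.Str.split₀ lines[k]) (pts ++ pvAvail a b c start (lines.take k))) →
    lines.foldl (pvStepA a b c)
      (start, ((pvIndexMap pts).size : Int), ((pvIndexMap pws).size : Int), pvIndexMap pts, pvIndexMap pws) =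
      (start + lines.length, ((pvIndexMap (pts ++ pvAvail a b c start lines)).size : Int),
        ((pvIndexMap (pws ++ pvWToks a b c start lines)).size : Int),
        pvIndexMap (pts ++ pvAvail a b c start lines), pvIndexMap (pws ++ pvWToks a b c start lines)) := by
  induction lines with
  | nil => intro start pts pws _; simp [pvAvail, pvWToks]
  | cons l ls ih =>
    intro start pts pws h
    rw [List.foldl_cons]
    have h0 := h 0 (by simp)
    simp only [List.getElem_cons_zero, List.take_zero, Nat.cast_zero, add_zero, pvAvail,
      List.append_nil] at h0
    rw [pvStepA_char a b c start pts pws l h0]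
    rw [ih (start + 1) (pts ++ pvAvail a b c start [l]) (pws ++ pvWToks a b c start [l]) ?_]
    · rw [pvAvail_cons a b c start l ls, pvWToks_cons a b c start l ls]
      have ha : pvAvail a b c start [l] =
          (match pvSection a b c (start + 1), PySem.Str.split₀ l with
           | 1, t0 :: _ => [t0]
           | 2, [t0] => [t0]
           | 2, t0 :: t1 :: _ => [t0, t1]
           | _, _ => []) := by rw [pvAvail_cons]; simp [pvAvail]
      have hw : pvWToks a b c start [l] =
          (match pvSection a b c (start + 1), PySem.Str.split₀ l with
           | 3, _ :: t1 :: _ => [t1]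
           | _, _ => []) := by rw [pvWToks_cons]; simp [pvWToks]
      rw [ha, hw]
      simp only [List.append_assoc, List.length_cons, Prod.mk.injEq, and_true, true_and]
      push_cast
      omega
    · intro k hk
      have hh := h (k + 1) (by simpa using hk)
      have harr : (start + 1) + (k : Int) = start + ((k + 1 : Nat) : Int) := by push_cast; ring
      have htk : pts ++ pvAvail a b c start ((l :: ls).take (k + 1)) =
          (pts ++ pvAvail a b c start [l]) ++ pvAvail a b c (start + 1) (ls.take k) := by
        rw [List.take_succ_cons, pvAvail_cons]
        have : pvAvail a b c start [l] =
            (match pvSection a b c (start + 1), PySem.Str.split₀ l with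
             | 1, t0 :: _ => [t0]
             | 2, [t0] => [t0]
             | 2, t0 :: t1 :: _ => [t0, t1]
             | _, _ => []) := by rw [pvAvail_cons]; simp [pvAvail]
        rw [this]
        simp [List.append_assoc]
      rw [harr, ← htk]
      simpa using hh

-- B's fold builds exactly the two token streams
lemma pvFoldB (a b c : Int) (lines : List String) : ∀ (start : Int) (ps ws : List String),
    (PySem.List.enumerate lines start).foldl (pvStepB a b c) (ps, ws) =
      (ps ++ pvAvail a b c start lines, ws ++ pvWToks a b c start lines) := by
  induction lines with
  | nil => intro start ps ws; simp [pvAvail, pvWToks, PySem.List.enumerate]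
  | cons l ls ih =>
    intro start ps ws
    rw [PySem.List.enumerate_cons, List.foldl_cons, pvAvail_cons, pvWToks_cons]
    rcases pvSection_cases a b c (start + 1) with hs | hs | hs | hs <;> rw [hs] <;>
      cases htoks : PySem.Str.split₀ l with
      | nil => simp [pvStepB, hs, htoks, ih]
      | cons t0 rest => cases rest <;> simp [pvStepB, hs, htoks, ih]

-- ===== VERDICT (by name: the statement is the Claim_ definition above) =====
theorem symb_state_list_spec : Claim_equal_symb_state_list := by
  intro hmm_file line_breakers _ hpre
  obtain ⟨hlen, hok⟩ := hpre
  rcases line_breakers with _ | ⟨b0, _ | ⟨b1, _ | ⟨b2, rest⟩⟩⟩ <;> simp at hlen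
  unfold Spec_symb_state_list symb_state_list symb_state_list_alt
  have hg0 : PySem.List.pyGet? (b0 :: b1 :: b2 :: rest) (0 : Int) = some b0 := by
    simpa using PySem.List.pyGet?_natCast (b0 :: b1 :: b2 :: rest) 0
  have hg1 : PySem.List.pyGet? (b0 :: b1 :: b2 :: rest) (1 : Int) = some b1 := by
    simpa using PySem.List.pyGet?_natCast (b0 :: b1 :: b2 :: rest) 1
  have hg2 : PySem.List.pyGet? (b0 :: b1 :: b2 :: rest) (2 : Int) = some b2 := by
    simpa using PySem.List.pyGet?_natCast (b0 :: b1 :: b2 :: rest) 2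
  rw [hg0, hg1, hg2]
  simp only []
  have hd0 : PySem.List.pyGetD (b0 :: b1 :: b2 :: rest) 0 0 = b0 := by
    simp [PySem.List.pyGetD, hg0]
  have hd1 : PySem.List.pyGetD (b0 :: b1 :: b2 :: rest) 1 0 = b1 := by
    simp [PySem.List.pyGetD, hg1]
  have hd2 : PySem.List.pyGetD (b0 :: b1 :: b2 :: rest) 2 0 = b2 := by
    simp [PySem.List.pyGetD, hg2]
  rw [hd0, hd1, hd2] at hok
  have hfa := pvFoldA b0 b1 b2 hmm_file 0 [] []
    (by intro k hk; simpa using hok k hk)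
  have hfb := pvFoldB b0 b1 b2 hmm_file 0 [] []
  simp only [List.nil_append] at hfa hfb
  have hinit : ((0 : Int), (0 : Int), (0 : Int),
      (PySem.Dict.empty : PySem.Dict String Int), (PySem.Dict.empty : PySem.Dict String Int)) =
      ((0 : Int), ((pvIndexMap []).size : Int), ((pvIndexMap []).size : Int),
        pvIndexMap [], pvIndexMap []) := rfl
  rw [hinit, hfa, hfb]
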